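-- pv_equiv track=rewrite | github.com/hap318/code-edabit | sort_by_freq.py | custom_sort_by_frequency
-- ===== SOURCE A (Python) =====
-- def custom_sort_by_frequency(arr):
--     frequency_dict = {}
--     for num in arr:
--         if num in frequency_dict:
--             frequency_dict[num] += 1
--         else:
--             frequency_dict[num] = 1
--
--     sorted_arr = sorted(arr, key=lambda x: (frequency_dict[x], arr.index(x)))
--
--     return sorted_arr
-- ===== SOURCE B (Python) =====
-- def custom_sort_by_frequency(arr):
--     count = {}
--     order = []
--     for num in arr:
--         if num in count:
--             count[num] += 1
--         else:
--             count[num] = 1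
--             order.append(num)
--     out = []
--     for v in sorted(order, key=lambda v: count[v]):
--         out.extend([v] * count[v])
--     return out
-- ===== Notes on version B (the rewrite author's own statement) =====
-- stated objective: faster
-- what changed: Instead of sorting all n elements with a key that recomputes arr.index(x) (a linear scan) per comparison, B makes one pass building a count dict and a first-occurrence order list of distinct values, stably sorts only the distinct values by count, and expands each value count times.
import Mathlib
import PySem

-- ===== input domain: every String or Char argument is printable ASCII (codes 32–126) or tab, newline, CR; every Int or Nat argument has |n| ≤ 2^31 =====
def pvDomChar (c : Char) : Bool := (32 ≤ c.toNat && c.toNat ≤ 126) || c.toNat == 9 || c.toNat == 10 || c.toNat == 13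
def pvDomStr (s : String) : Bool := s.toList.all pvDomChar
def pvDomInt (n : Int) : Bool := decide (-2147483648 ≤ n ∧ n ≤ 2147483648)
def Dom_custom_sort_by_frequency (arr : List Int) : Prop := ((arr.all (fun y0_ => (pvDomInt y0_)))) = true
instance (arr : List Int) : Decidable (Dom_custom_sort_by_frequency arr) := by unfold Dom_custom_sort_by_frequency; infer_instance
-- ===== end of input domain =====

-- B replaces A's sort of all n elements (whose key recomputes arr.index per element) by one
-- counting pass, a stable sort of the distinct values by count alone, and an expansion pass.

-- ===== PORT A =====
def custom_sort_by_frequency (arr : List Int) : List Int :=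
  let frequency_dict : PySem.Dict Int Int :=
    arr.foldl (fun d num =>
      if d.contains num then d.insert num (d.getD num 0 + 1) else d.insert num 1)
      PySem.Dict.empty
  -- arr.index(x): exact here, every x the key is applied to is an element of arr
  PySem.List.sorted2 arr (fun x => frequency_dict.getD x 0)
    (fun x => (((PySem.List.index? arr x).getD 0 : Nat) : Int))

-- ===== PORT B =====
def custom_sort_by_frequency_alt (arr : List Int) : List Int :=
  let st : PySem.Dict Int Int × List Int :=
    arr.foldl (fun st num =>
      if st.1.contains num then (st.1.insert num (st.1.getD num 0 + 1), st.2)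
      else (st.1.insert num 1, st.2 ++ [num])) (PySem.Dict.empty, [])
  (PySem.List.sorted st.2 (fun v => st.1.getD v 0)).foldl
    (fun out v => out ++ PySem.List.pyRepeat [v] (st.1.getD v 0)) []

-- ===== PRECONDITION & SPEC =====
def Spec_custom_sort_by_frequency (arr : List Int) (out : List Int) : Prop := out = custom_sort_by_frequency_alt arr
instance (arr : List Int) (out : List Int) : Decidable (Spec_custom_sort_by_frequency arr out) := by unfold Spec_custom_sort_by_frequency; infer_instance

-- ===== CLAIM (what is proved, stated in full; the proofs are below) =====
def Claim_equal_custom_sort_by_frequency : Prop := ∀ (arr : List Int), Dom_custom_sort_by_frequency arr → Spec_custom_sort_by_frequency arr (custom_sort_by_frequency arr)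

-- ===== LEMMAS AND PROOFS =====

/-- first-occurrence index of `x` in `arr` (total form of `arr.index(x)`). -/
def idxf (arr : List Int) (x : Int) : Nat := (PySem.List.index? arr x).getD 0

/-- combined sort key: frequency then first-occurrence index, encoded lexicographically. -/
def Kf (arr : List Int) (x : Int) : Nat := arr.count x * (arr.length + 1) + idxf arr x

theorem lex_combine {c1 c2 i1 i2 N : Nat} (h1 : i1 < N) (h2 : i2 < N) :
    c1 * N + i1 < c2 * N + i2 ↔ (c1 < c2 ∨ (c1 = c2 ∧ i1 < i2)) := by
  constructor
  · intro h
    rcases Nat.lt_trichotomy c1 c2 with hc | hc | hc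
    · exact Or.inl hc
    · exact Or.inr ⟨hc, by subst hc; omega⟩
    · exfalso
      have : c2 * N + N ≤ c1 * N := by
        have := Nat.succ_le_of_lt hc
        calc c2 * N + N = (c2 + 1) * N := by ring
          _ ≤ c1 * N := Nat.mul_le_mul_right _ this
      omega
  · rintro (hc | ⟨hc, hi⟩)
    · have : c1 * N + N ≤ c2 * N := by
        have := Nat.succ_le_of_lt hc
        calc c1 * N + N = (c1 + 1) * N := by ring
          _ ≤ c2 * N := Nat.mul_le_mul_right _ this
      omega
    · subst hc; omega

theorem idx_spec {arr : List Int} {x : Int} (h : x ∈ arr) :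
    ∃ hk : idxf arr x < arr.length, arr[idxf arr x]'hk = x := by
  have hs : (PySem.List.index? arr x).isSome = true := (PySem.List.index?_isSome_iff arr x).2 h
  rcases Option.isSome_iff_exists.mp hs with ⟨k, hk⟩
  rcases PySem.List.getElem_of_index?_eq_some hk with ⟨hlt, hget, _⟩
  have : idxf arr x = k := by unfold idxf; rw [hk]; rfl
  exact this ▸ ⟨hlt, hget⟩

theorem idx_lt {arr : List Int} {x : Int} (h : x ∈ arr) : idxf arr x < arr.length :=
  (idx_spec h).1

theorem K_inj {arr : List Int} {a b : Int} (ha : a ∈ arr) (hb : b ∈ arr)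
    (h : Kf arr a = Kf arr b) : a = b := by
  rcases idx_spec ha with ⟨hla, hga⟩
  rcases idx_spec hb with ⟨hlb, hgb⟩
  have hia : idxf arr a < arr.length + 1 := by omega
  have hib : idxf arr b < arr.length + 1 := by omega
  have hidx : idxf arr a = idxf arr b := by
    have h1 := Nat.mul_add_mod' (arr.count a) (idxf arr a) (arr.length + 1)
    have h2 := Nat.mul_add_mod' (arr.count b) (idxf arr b) (arr.length + 1)
    have : Kf arr a % (arr.length + 1) = Kf arr b % (arr.length + 1) := by rw [h]
    simpa [Kf, Nat.mul_add_mod', Nat.mod_eq_of_lt hia, Nat.mod_eq_of_lt hib] using this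
  rw [← hga, ← hgb]
  congr 1

theorem K_le_iff {arr : List Int} {a b : Int} (ha : a ∈ arr) (hb : b ∈ arr) :
    Kf arr a < Kf arr b ↔ (arr.count a < arr.count b ∨
      (arr.count a = arr.count b ∧ idxf arr a < idxf arr b)) := by
  have hia : idxf arr a < arr.length + 1 := by have := idx_lt ha; omega
  have hib : idxf arr b < arr.length + 1 := by have := idx_lt hb; omega
  exact lex_combine hia hib

theorem insertBy_congr (f g : Int → Int → Bool) (x : Int) (ys : List Int)
    (h : ∀ a ∈ x :: ys, ∀ b ∈ x :: ys, f a b = g a b) :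
    PySem.List.insertBy f x ys = PySem.List.insertBy g x ys := by
  induction ys with
  | nil => rfl
  | cons y ys ih =>
    have hxy : f x y = g x y := h x (by simp) y (by simp)
    simp only [PySem.List.insertBy, hxy]
    split
    · rfl
    · rw [ih (fun a ha b hb =>
        h a (by simp at ha ⊢; tauto) b (by simp at hb ⊢; tauto))]

theorem foldl_insertBy_congr (f g : Int → Int → Bool) (l acc : List Int)
    (h : ∀ a b : Int, (a ∈ l ∨ a ∈ acc) → (b ∈ l ∨ b ∈ acc) → f a b = g a b) :
    l.foldl (fun acc x => PySem.List.insertBy f x acc) acc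
      = l.foldl (fun acc x => PySem.List.insertBy g x acc) acc := by
  induction l generalizing acc with
  | nil => rfl
  | cons x l ih =>
    simp only [List.foldl_cons]
    rw [insertBy_congr f g x acc
      (by intro a ha b hb
          refine h a b ?_ ?_ <;> simp_all <;> tauto)]
    exact ih _ (by
      intro a b ha hb
      refine h a b ?_ ?_ <;>
        [rcases ha with h' | h'; rcases hb with h' | h'] <;>
        simp_all [PySem.List.insertBy_mem_iff] <;> tauto)

theorem uniq (arr : List Int) : ∀ (l₁ l₂ : List Int), l₁.Perm l₂ →
    (∀ a ∈ l₁, a ∈ arr) →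
    l₁.Pairwise (fun a b => Kf arr a ≤ Kf arr b) →
    l₂.Pairwise (fun a b => Kf arr a ≤ Kf arr b) → l₁ = l₂ := by
  intro l₁
  induction l₁ with
  | nil => intro l₂ hp _ _ _; simpa using hp.nil_eq
  | cons a t ih =>
    intro l₂ hp hm h1 h2
    cases l₂ with
    | nil => exact absurd hp.symm.nil_eq (by simp)
    | cons b s =>
      have hab : a = b := by
        have hbmem : b = a ∨ b ∈ t := by simpa using hp.mem_iff.2 (by simp)
        have hamem : a = b ∨ a ∈ s := by simpa using hp.mem_iff.1 (by simp)
        have h1' : Kf arr a ≤ Kf arr b := by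
          rcases hbmem with rfl | hbt
          · rfl
          · exact (List.pairwise_cons.1 h1).1 b hbt
        have h2' : Kf arr b ≤ Kf arr a := by
          rcases hamem with rfl | has
          · rfl
          · exact (List.pairwise_cons.1 h2).1 a has
        exact K_inj (hm a (by simp)) (hm b (hp.mem_iff.2 (by simp))) (le_antisymm h1' h2')
      subst hab
      have hts : t.Perm s := hp.cons_inv
      rw [ih s hts (fun x hx => hm x (by simp [hx]))
        (List.pairwise_cons.1 h1).2 (List.pairwise_cons.1 h2).2]

theorem freq_getD (arr : List Int) (x : Int) :
    (arr.foldl (fun d num =>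
        if d.contains num then d.insert num (d.getD num 0 + 1) else d.insert num 1)
        PySem.Dict.empty).getD x 0 = (arr.count x : Int) := by
  rw [PySem.List.foldl_congr_mem arr _ (fun d num => d.insert num (d.getD num 0 + 1)) _
    (by intro d num _
        split
        · rfl
        · rename_i hc
          show d.insert num 1 = d.insert num (d.getD num 0 + 1)
          rw [PySem.Dict.getD_of_not_contains d 0 (by simpa using hc)]
          norm_num)]
  rw [PySem.Dict.getD_foldl_insert_add_one]
  simp [PySem.Dict.getD_empty]

theorem beforeA_eq (arr : List Int) (a b : Int) (ha : a ∈ arr) (hb : b ∈ arr) :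
    (decide ((arr.count a : Int) < (arr.count b : Int)) ||
      (!decide ((arr.count b : Int) < (arr.count a : Int)) &&
        decide ((idxf arr a : Int) < (idxf arr b : Int))))
      = decide (Kf arr a < Kf arr b) := by
  have hK := K_le_iff ha hb
  simp only [Nat.cast_lt]
  rw [← decide_not, ← Bool.decide_and, ← Bool.decide_or, decide_eq_decide]
  rw [hK]
  omega

theorem portA_eq_sorted (arr : List Int) :
    custom_sort_by_frequency arr = PySem.List.sorted arr (fun x => Kf arr x) := by
  show PySem.List.sorted2 arr _ _ = _
  rw [PySem.List.sorted_eq_foldl_insertBy]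
  simp only [PySem.List.sorted2]
  apply foldl_insertBy_congr
  intro a b ha hb
  have ha' : a ∈ arr := by tauto
  have hb' : b ∈ arr := by tauto
  simp only [Bool.false_eq_true, if_false, freq_getD]
  simpa only [idxf] using beforeA_eq arr a b ha' hb'

-- ===== B side =====

theorem pairB (l : List Int) (d : PySem.Dict Int Int) (o : List Int)
    (hinv : ∀ x : Int, d.contains x = decide (x ∈ o)) :
    l.foldl (fun st num =>
        if st.1.contains num then (st.1.insert num (st.1.getD num 0 + 1), st.2)
        else (st.1.insert num 1, st.2 ++ [num])) (d, o)
      = (l.foldl (fun d num => d.insert num (d.getD num 0 + 1)) d,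
         l.foldl PySem.Set.add o) := by
  induction l generalizing d o with
  | nil => rfl
  | cons num l ih =>
    simp only [List.foldl_cons]
    by_cases hc : d.contains num = true
    · have hmem : num ∈ o := by have := hinv num; simp [hc] at this; exact this
      rw [show (if d.contains num = true then (d.insert num (d.getD num 0 + 1), o)
            else (d.insert num 1, o ++ [num])) = (d.insert num (d.getD num 0 + 1), o) by
          simp [hc]]
      rw [show PySem.Set.add o num = o from PySem.Set.add_of_mem hmem]
      exact ih _ _ (by
        intro x
        rw [PySem.Dict.contains_insert]
        by_cases hx : x = num <;> simp [hx, hmem, hinv x])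
    · have hnmem : num ∉ o := by have := hinv num; simp [hc] at this; exact this
      rw [show (if d.contains num = true then (d.insert num (d.getD num 0 + 1), o)
            else (d.insert num 1, o ++ [num])) = (d.insert num 1, o ++ [num]) by
          simp [hc]]
      rw [show d.insert num 1 = d.insert num (d.getD num 0 + 1) by
        rw [PySem.Dict.getD_of_not_contains d 0 (by simpa using hc)]; norm_num]
      rw [show PySem.Set.add o num = o ++ [num] from PySem.Set.add_of_not_mem hnmem]
      exact ih _ _ (by
        intro x
        rw [PySem.Dict.contains_insert]
        by_cases hx : x = num <;> simp [hx, hinv x])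

theorem idxf_cons_of_ne {xs : List Int} {x y : Int} (hy : y ∈ xs) (hne : x ≠ y) :
    idxf (x :: xs) y = idxf xs y + 1 := by
  have hs : (PySem.List.index? xs y).isSome = true := (PySem.List.index?_isSome_iff xs y).2 hy
  rcases Option.isSome_iff_exists.mp hs with ⟨k, hk⟩
  rw [idxf, idxf, PySem.List.index?_cons_of_ne _ hne, hk]
  rfl

theorem ofList_pairwise_idx (arr : List Int) :
    (PySem.Set.ofList arr).Pairwise (fun a b => idxf arr a < idxf arr b) := by
  induction arr with
  | nil => simp [PySem.Set.ofList]
  | cons x xs ih =>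
    rw [PySem.Set.ofList_cons]
    refine List.pairwise_cons.2 ⟨?_, ?_⟩
    · intro y hy
      have hyne : y ≠ x := by
        rcases List.mem_filter.1 hy with ⟨_, h2⟩
        simpa using h2
      have hyxs : y ∈ xs := (PySem.Set.mem_ofList xs y).1 (List.mem_filter.1 hy).1
      have hx0 : idxf (x :: xs) x = 0 := by
        rw [idxf, PySem.List.index?_cons_self]; rfl
      rw [hx0, idxf_cons_of_ne hyxs (Ne.symm hyne)]
      omega
    · have hsub : List.Sublist ((PySem.Set.ofList xs).discard x) (PySem.Set.ofList xs) :=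
        List.filter_sublist
      have hpw := ih.sublist hsub
      refine hpw.imp_of_mem ?_
      intro a b hamem hbmem hab
      have hane : a ≠ x := by
        rcases List.mem_filter.1 hamem with ⟨_, h2⟩; simpa using h2
      have hbne : b ≠ x := by
        rcases List.mem_filter.1 hbmem with ⟨_, h2⟩; simpa using h2
      have haxs : a ∈ xs := (PySem.Set.mem_ofList xs a).1 (List.mem_filter.1 hamem).1
      have hbxs : b ∈ xs := (PySem.Set.mem_ofList xs b).1 (List.mem_filter.1 hbmem).1
      rw [idxf_cons_of_ne haxs (Ne.symm hane), idxf_cons_of_ne hbxs (Ne.symm hbne)]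
      omega

/-- stability of the insertion sort used by `PySem.List.sorted`: relation maintained. -/
def Stab (c : Int → Int) (p : Int → Nat) (a b : Int) : Prop :=
  c a < c b ∨ (c a = c b ∧ p a < p b)

theorem insertBy_stable (c : Int → Int) (p : Int → Nat) (x : Int) (ys : List Int)
    (h1 : ys.Pairwise (Stab c p)) (h2 : ∀ y ∈ ys, p y < p x) :
    (PySem.List.insertBy (fun a b => decide (c a < c b)) x ys).Pairwise (Stab c p) := by
  induction ys with
  | nil => simp [PySem.List.insertBy]
  | cons y ys ih =>
    simp only [PySem.List.insertBy]
    split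
    · rename_i hlt
      have hcy : c x < c y := by simpa using hlt
      refine List.pairwise_cons.2 ⟨?_, h1⟩
      intro z hz
      rcases List.mem_cons.1 hz with rfl | hz
      · exact Or.inl hcy
      · rcases (List.pairwise_cons.1 h1).1 z hz with h | ⟨h, _⟩
        · exact Or.inl (lt_trans hcy h)
        · exact Or.inl (h ▸ hcy)
    · rename_i hnlt
      have hxy : ¬ c x < c y := by simpa using hnlt
      refine List.pairwise_cons.2 ⟨?_, ih (List.pairwise_cons.1 h1).2
        (fun z hz => h2 z (List.mem_cons_of_mem _ hz))⟩
      intro z hz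
      rcases (PySem.List.insertBy_mem_iff _ x z ys).1 hz with hzx | hz
      · subst hzx
        rcases lt_or_eq_of_le (show c y ≤ c z by omega) with h | h
        · exact Or.inl h
        · exact Or.inr ⟨h, h2 y (by simp)⟩
      · exact (List.pairwise_cons.1 h1).1 z hz

theorem foldl_stable (c : Int → Int) (p : Int → Nat) :
    ∀ (l acc : List Int), acc.Pairwise (Stab c p) →
    l.Pairwise (fun a b => p a < p b) →
    (∀ a ∈ acc, ∀ x ∈ l, p a < p x) →
    (l.foldl (fun acc x => PySem.List.insertBy (fun a b => decide (c a < c b)) x acc) acc).Pairwise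
      (Stab c p) := by
  intro l
  induction l with
  | nil => intro acc hacc _ _; exact hacc
  | cons x l ih =>
    intro acc hacc hl hcross
    simp only [List.foldl_cons]
    refine ih _ (insertBy_stable c p x acc hacc (fun y hy => hcross y hy x (by simp)))
      (List.pairwise_cons.1 hl).2 ?_
    intro a ha z hz
    rcases (PySem.List.insertBy_mem_iff _ x a acc).1 ha with rfl | ha
    · exact (List.pairwise_cons.1 hl).1 z hz
    · exact hcross a ha z (by simp [hz])

theorem count_flatMap_replicate (arr : List Int) :
    ∀ (L : List Int), L.Nodup → ∀ (a : Int),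
    (L.flatMap (fun v => List.replicate (arr.count v) v)).count a
      = if a ∈ L then arr.count a else 0 := by
  intro L
  induction L with
  | nil => simp
  | cons v L ih =>
    intro hnd a
    rcases List.nodup_cons.1 hnd with ⟨hv, hnd'⟩
    simp only [List.flatMap_cons, List.count_append, ih hnd' a, List.count_replicate]
    by_cases hav : v = a
    · subst hav
      simp [hv]
    · simp [Ne.symm hav, hav, beq_iff_eq]

theorem flatMap_perm (arr : List Int) (L : List Int) (hnd : L.Nodup)
    (hmem : ∀ a : Int, a ∈ L ↔ a ∈ arr) :
    (L.flatMap (fun v => List.replicate (arr.count v) v)).Perm arr := by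
  rw [List.perm_iff_count]
  intro a
  rw [count_flatMap_replicate arr L hnd a]
  by_cases ha : a ∈ arr
  · simp [(hmem a).2 ha]
  · rw [if_neg (fun h => ha ((hmem a).1 h)), List.count_eq_zero_of_not_mem ha]

theorem stab_K {arr : List Int} {a b : Int} (ha : a ∈ arr) (hb : b ∈ arr)
    (h : Stab (fun v => (arr.count v : Int)) (idxf arr) a b) : Kf arr a ≤ Kf arr b := by
  have := K_le_iff ha hb
  rcases h with h | ⟨h, h'⟩
  · have hc : (arr.count a : Int) < (arr.count b : Int) := h
    exact le_of_lt (this.2 (Or.inl (by exact_mod_cast hc)))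
  · have hc : (arr.count a : Int) = (arr.count b : Int) := h
    exact le_of_lt (this.2 (Or.inr ⟨by exact_mod_cast hc, h'⟩))

theorem pairwise_replicate_le (arr : List Int) (n : Nat) (v : Int) :
    (List.replicate n v).Pairwise (fun a b => Kf arr a ≤ Kf arr b) := by
  induction n with
  | zero => simp
  | succ n ih =>
    rw [List.replicate_succ]
    refine List.pairwise_cons.2 ⟨?_, ih⟩
    intro b hb
    rw [List.eq_of_mem_replicate hb]

theorem flatMap_pairwise (arr : List Int) :
    ∀ (L : List Int), L.Pairwise (Stab (fun v => (arr.count v : Int)) (idxf arr)) →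
    (∀ v ∈ L, v ∈ arr) →
    (L.flatMap (fun v => List.replicate (arr.count v) v)).Pairwise
      (fun a b => Kf arr a ≤ Kf arr b) := by
  intro L
  induction L with
  | nil => simp
  | cons v L ih =>
    intro hpw hmem
    simp only [List.flatMap_cons]
    refine List.pairwise_append.2 ⟨pairwise_replicate_le arr _ v,
      ih (List.pairwise_cons.1 hpw).2 (fun u hu => hmem u (by simp [hu])), ?_⟩
    intro a ha b hb
    rw [List.eq_of_mem_replicate ha]
    rcases List.mem_flatMap.1 hb with ⟨u, huL, hbu⟩
    rw [List.eq_of_mem_replicate hbu]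
    exact stab_K (hmem v (by simp)) (hmem u (by simp [huL]))
      ((List.pairwise_cons.1 hpw).1 u huL)

theorem portB_eq (arr : List Int) :
    custom_sort_by_frequency_alt arr
      = (PySem.List.sorted (PySem.Set.ofList arr) (fun v : Int => (arr.count v : Int))).flatMap
          (fun v => List.replicate (arr.count v) v) := by
  show (PySem.List.sorted ((arr.foldl _ (PySem.Dict.empty, [])).2) _).foldl _ [] = _
  rw [pairB arr PySem.Dict.empty []
    (by intro x; simp [PySem.Dict.contains_empty])]
  have hget : ∀ v : Int,
      (arr.foldl (fun d num => d.insert num (d.getD num 0 + 1)) PySem.Dict.empty).getD v 0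
        = (arr.count v : Int) := by
    intro v
    rw [PySem.Dict.getD_foldl_insert_add_one]
    simp [PySem.Dict.getD_empty]
  simp only [hget]
  rw [show List.foldl PySem.Set.add [] arr = PySem.Set.ofList arr from
    (PySem.Set.ofList_eq_foldl arr).symm]
  rw [PySem.List.foldl_append_eq_flatMap (fun v => PySem.List.pyRepeat [v] (arr.count v : Int))]
  simp [PySem.List.pyRepeat_singleton]

theorem custom_sort_by_frequency_eq (arr : List Int) :
    custom_sort_by_frequency arr = custom_sort_by_frequency_alt arr := by
  rw [portA_eq_sorted, portB_eq]
  have hmemS : ∀ a : Int, a ∈ PySem.List.sorted (PySem.Set.ofList arr)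
      (fun v : Int => (arr.count v : Int)) ↔ a ∈ arr := by
    intro a
    rw [PySem.List.mem_sorted, PySem.Set.mem_ofList]
  have hnd : (PySem.List.sorted (PySem.Set.ofList arr)
      (fun v : Int => (arr.count v : Int))).Nodup :=
    (PySem.List.sorted_perm _ _ _).nodup_iff.2 (PySem.Set.nodup_ofList arr)
  have hstab : (PySem.List.sorted (PySem.Set.ofList arr)
      (fun v : Int => (arr.count v : Int))).Pairwise
        (Stab (fun v => (arr.count v : Int)) (idxf arr)) := by
    rw [PySem.List.sorted_eq_foldl_insertBy]
    exact foldl_stable _ _ (PySem.Set.ofList arr) [] (by simp)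
      (ofList_pairwise_idx arr) (by simp)
  refine uniq arr _ _ ?_ ?_ ?_ ?_
  · exact (PySem.List.sorted_perm _ _ _).trans
      ((flatMap_perm arr _ hnd hmemS).symm)
  · intro a ha
    rw [PySem.List.mem_sorted] at ha
    exact ha
  · exact PySem.List.sorted_pairwise arr (fun x => Kf arr x)
  · exact flatMap_pairwise arr _ hstab (fun v hv => (hmemS v).1 hv)

-- ===== VERDICT (by name: the statement is the Claim_ definition above) =====
theorem custom_sort_by_frequency_spec : Claim_equal_custom_sort_by_frequency := by
  intro arr _
  exact custom_sort_by_frequency_eq arr
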